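-- pv_equiv track=rewrite | github.com/JibanKumar-cloud/ai-multimodal-product-intelligence | src/models/rule_based.py | _match_keywords
-- ===== SOURCE A (Python) =====
-- from typing import Optional
--
-- def _match_keywords(text: str, keyword_dict: dict[str, list[str]]) -> Optional[str]:
--     """Find the best matching category based on keyword count."""
--     best_match = None
--     best_count = 0
--
--     for category, keywords in keyword_dict.items():
--         count = sum(1 for kw in keywords if kw in text)
--         if count > best_count:
--             best_count = count
--             best_match = category
--
--     return best_match
-- ===== SOURCE B (Python) =====
-- from typing import Optional
--
-- def _match_keywords(text: str, keyword_dict: dict[str, list[str]]) -> Optional[str]: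
--     """Find the best matching category based on keyword count."""
--     scored = [(sum(1 for kw in keywords if kw in text), i, category)
--               for i, (category, keywords) in enumerate(keyword_dict.items())]
--     ranked = sorted(scored, key=lambda t: (-t[0], t[1]))
--     if ranked and ranked[0][0] > 0:
--         return ranked[0][2]
--     return None
-- ===== Notes on version B (the rewrite author's own statement) =====
-- stated objective: alternative
-- what changed: Replaces A's single-pass running-argmax loop with score-the-items, stable sort by (-score, index), and read the answer off the head of the sorted list.
import Mathlib
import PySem

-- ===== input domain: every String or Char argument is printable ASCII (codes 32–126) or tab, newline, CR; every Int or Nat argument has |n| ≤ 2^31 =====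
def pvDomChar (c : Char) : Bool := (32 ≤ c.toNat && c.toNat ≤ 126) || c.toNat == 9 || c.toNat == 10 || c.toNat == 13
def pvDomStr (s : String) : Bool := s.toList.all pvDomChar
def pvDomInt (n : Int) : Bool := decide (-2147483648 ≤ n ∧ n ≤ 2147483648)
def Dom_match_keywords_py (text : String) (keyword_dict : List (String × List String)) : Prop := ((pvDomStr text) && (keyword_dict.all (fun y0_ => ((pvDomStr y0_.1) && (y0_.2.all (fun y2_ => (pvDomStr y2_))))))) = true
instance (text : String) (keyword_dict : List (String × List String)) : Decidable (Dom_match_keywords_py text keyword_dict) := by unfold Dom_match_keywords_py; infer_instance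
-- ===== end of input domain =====

-- B replaces A's running-argmax loop by scoring each category, sorting the scored triples by (-score, index), and reading the head; objective: alternative (sort-based selection, same result incl. first-wins ties).


-- ===== PORT A =====
-- running argmax: state (best_match, best_count), strict improvement only
def match_keywords_py (text : String) (keyword_dict : List (String × List String)) : Option String :=
  (keyword_dict.foldl
    (fun (s : Option String × Nat) p =>
      let count := p.2.foldl (fun acc kw => if PySem.Str.isIn kw text then acc + 1 else acc) 0
      if count > s.2 then (some p.1, count) else s)
    (none, 0)).1

-- ===== PORT B =====
-- sum(1 for kw in keywords if kw in text)
def pvCount (text : String) (keywords : List String) : Nat :=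
  keywords.foldl (fun acc kw => if PySem.Str.isIn kw text then acc + 1 else acc) 0

def match_keywords_py_alt (text : String) (keyword_dict : List (String × List String)) : Option String :=
  -- scored = [(score, i, category) for i, (category, keywords) in enumerate(...)]
  let scored := (PySem.List.enumerate keyword_dict).map
    (fun q => (pvCount text q.2.2, q.1, q.2.1))
  -- ranked = sorted(scored, key=lambda t: (-t[0], t[1]))
  let ranked := PySem.List.sorted2 scored (fun t => -(t.1 : Int)) (fun t => t.2.1)
  match ranked with
  | [] => none
  | t :: _ => if t.1 > 0 then some t.2.2 else none

-- ===== PRECONDITION & SPEC =====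
def Spec_match_keywords_py (text : String) (keyword_dict : List (String × List String)) (out : Option String) : Prop := out = match_keywords_py_alt text keyword_dict
instance (text : String) (keyword_dict : List (String × List String)) (out : Option String) : Decidable (Spec_match_keywords_py text keyword_dict out) := by unfold Spec_match_keywords_py; infer_instance

-- ===== CLAIM (what is proved, stated in full; the proofs are below) =====
def Claim_equal_match_keywords_py : Prop := ∀ (text : String) (keyword_dict : List (String × List String)), Dom_match_keywords_py text keyword_dict → Spec_match_keywords_py text keyword_dict (match_keywords_py text keyword_dict)

-- ===== LEMMAS AND PROOFS =====

-- A's loop step, over the precomputed (category, count) pair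
def pvSel (s : Option String × Nat) (c : String × Nat) : Option String × Nat :=
  if c.2 > s.2 then (some c.1, c.2) else s

-- first-maximum step on (category, count) pairs
def pvMax (b c : String × Nat) : (String × Nat) :=
  if c.2 > b.2 then c else b

-- first-maximum step on (score, index, category) triples
def pvMax3 (b c : Nat × Int × String) : Nat × Int × String :=
  if c.1 > b.1 then c else b

-- the lexicographic "strictly before" used by sorted2 with keys (-score, index)
def pvBefore (a b : Nat × Int × String) : Bool :=
  decide (-(a.1 : Int) < -(b.1 : Int)) ||
    (!decide (-(b.1 : Int) < -(a.1 : Int)) && decide (a.2.1 < b.2.1))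

lemma pvMax_le (t : List (String × Nat)) (b : String × Nat) :
    b.2 ≤ (t.foldl pvMax b).2 := by
  induction t generalizing b with
  | nil => simp
  | cons c t ih =>
      simp only [List.foldl_cons]
      refine le_trans ?_ (ih (pvMax b c))
      unfold pvMax; split <;> omega

-- once A's state carries `some`, it mirrors the max fold exactly
lemma pvSel_some (t : List (String × Nat)) (b : String) (bc : Nat) :
    t.foldl pvSel (some b, bc) = (some (t.foldl pvMax (b, bc)).1, (t.foldl pvMax (b, bc)).2) := by
  induction t generalizing b bc with
  | nil => simp
  | cons c t ih =>
      simp only [List.foldl_cons, pvSel, pvMax]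
      split <;> simp [ih]

-- A's fold from (none, 0) over h :: t equals first-max selection with a positivity guard
lemma pv_main (t : List (String × Nat)) (h : String × Nat) :
    ((h :: t).foldl pvSel (none, 0)).1 =
      (if (t.foldl pvMax h).2 > 0 then some (t.foldl pvMax h).1 else none) := by
  induction t generalizing h with
  | nil =>
      by_cases hp : h.2 > 0 <;> simp [pvSel, hp]
  | cons c t ih =>
      by_cases hp : h.2 > 0
      · have hsel : pvSel (none, 0) h = (some h.1, h.2) := by
          unfold pvSel; rw [if_pos (by simpa using hp)]
        have step1 : (h :: c :: t).foldl pvSel (none, 0) = (c :: t).foldl pvSel (some h.1, h.2) := by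
          simp only [List.foldl_cons, hsel]
        rw [step1, pvSel_some]
        have hle : (h.1, h.2).2 ≤ ((c :: t).foldl pvMax (h.1, h.2)).2 := pvMax_le _ _
        simp only [Prod.mk.eta] at hle
        simp only [Prod.mk.eta, List.foldl_cons] at *
        rw [if_pos (by omega)]
      · have hsel : pvSel (none, 0) h = (none, 0) := by
          unfold pvSel; rw [if_neg (by simpa using hp)]
        have drop_h : ∀ (l : List (String × Nat)),
            (h :: l).foldl pvSel (none, 0) = l.foldl pvSel (none, 0) := by
          intro l
          simp only [List.foldl_cons, hsel]
        by_cases hc : c.2 > 0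
        · have hmax : pvMax h c = c := by unfold pvMax; rw [if_pos (by omega)]
          rw [drop_h (c :: t), ih c]
          simp only [List.foldl_cons, hmax]
        · have hmax : pvMax h c = h := by unfold pvMax; rw [if_neg (by omega)]
          have hselc : pvSel (none, 0) c = (none, 0) := by
            unfold pvSel; rw [if_neg (by simpa using hc)]
          have drop_c : (c :: t).foldl pvSel (none, 0) = t.foldl pvSel (none, 0) := by
            simp only [List.foldl_cons, hselc]
          have drop_h2 : (h :: t).foldl pvSel (none, 0) = t.foldl pvSel (none, 0) := by
            simpa using drop_h t
          rw [drop_h (c :: t), drop_c, ← drop_h2, ih h]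
          simp only [List.foldl_cons, hmax]

lemma pvA_eq (text : String) (kd : List (String × List String)) :
    match_keywords_py text kd =
      ((kd.map (fun p => (p.1, pvCount text p.2))).foldl pvSel (none, 0)).1 := by
  unfold match_keywords_py
  rw [List.foldl_map]
  rfl

-- head of insertBy
lemma pv_insertBy_head {α : Type} (b : α → α → Bool) (x h : α) (t : List α) :
    (PySem.List.insertBy b x (h :: t)).head? =
      some (if b x h then x else h) := by
  simp only [PySem.List.insertBy]
  split <;> simp_all

-- head of the insertion-sort fold is a running "first minimum"
lemma pv_fold_head {α : Type} (b : α → α → Bool) (t : List α) (acc : List α) (h : α)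
    (hh : acc.head? = some h) :
    (t.foldl (fun a x => PySem.List.insertBy b x a) acc).head? =
      some (t.foldl (fun h x => if b x h then x else h) h) := by
  induction t generalizing acc h with
  | nil => simpa using hh
  | cons c t ih =>
      cases acc with
      | nil => simp at hh
      | cons a0 at_ =>
          simp only [List.head?_cons, Option.some.injEq] at hh
          subst hh
          simp only [List.foldl_cons]
          exact ih _ _ (pv_insertBy_head b c a0 at_)

-- indices in enumerate are ≥ start
lemma pv_enum_ge (kd : List (String × List String)) (s : Int) :
    ∀ q ∈ PySem.List.enumerate kd s, s ≤ q.1 := by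
  induction kd generalizing s with
  | nil =>
      intro q hq
      rw [show PySem.List.enumerate ([] : List (String × List String)) s = [] from rfl] at hq
      exact absurd hq List.not_mem_nil
  | cons p t ih =>
      intro q hq
      rw [show PySem.List.enumerate (p :: t) s = (s, p) :: PySem.List.enumerate t (s + 1) from rfl] at hq
      rcases List.mem_cons.mp hq with h | h
      · simp [h]
      · have := ih (s + 1) q h; omega

-- when the incoming element has a strictly larger index, pvBefore is plain score comparison
lemma pv_before_eq (x h : Nat × Int × String) (hidx : h.2.1 < x.2.1) :
    (if pvBefore x h then x else h) = pvMax3 h x := by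
  unfold pvBefore pvMax3
  have h1 : ¬ (x.2.1 < h.2.1) := by omega
  by_cases hs : h.1 < x.1
  · have : -(x.1 : Int) < -(h.1 : Int) := by omega
    simp [this, hs]
  · have : ¬ (-(x.1 : Int) < -(h.1 : Int)) := by omega
    simp [this, h1, hs]

-- over a list of triples with indices strictly above h's (and increasing), the
-- running-first-minimum under pvBefore is the running first-maximum of scores
lemma pv_run_eq (t : List (Nat × Int × String)) (h : Nat × Int × String)
    (hlt : ∀ x ∈ t, h.2.1 < x.2.1)
    (hp : t.Pairwise (fun a b => a.2.1 < b.2.1)) :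
    t.foldl (fun h x => if pvBefore x h then x else h) h = t.foldl pvMax3 h := by
  induction t generalizing h with
  | nil => rfl
  | cons c t ih =>
      simp only [List.foldl_cons]
      rw [pv_before_eq c h (hlt c (by simp))]
      rcases List.pairwise_cons.mp hp with ⟨hc, hp'⟩
      refine ih (pvMax3 h c) ?_ hp'
      intro x hx
      unfold pvMax3
      split
      · exact hc x hx
      · exact lt_trans (hlt c (by simp)) (hc x hx)

-- projecting triples (score, i, cat) to pairs (cat, score) turns pvMax3 into pvMax
def pvProj (t : Nat × Int × String) : String × Nat := (t.2.2, t.1)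

lemma pv_proj_fold (t : List (Nat × Int × String)) (h : Nat × Int × String) :
    pvProj (t.foldl pvMax3 h) = (t.map pvProj).foldl pvMax (pvProj h) := by
  induction t generalizing h with
  | nil => rfl
  | cons c t ih =>
      simp only [List.foldl_cons, List.map_cons]
      rw [ih]
      congr 1
      unfold pvMax3 pvMax pvProj
      dsimp only
      split <;> rfl

-- the scored list projects back to A's (category, count) list
lemma pv_scored_proj (text : String) (kd : List (String × List String)) (s : Int) :
    ((PySem.List.enumerate kd s).map (fun q => (pvCount text q.2.2, q.1, q.2.1))).map pvProj
      = kd.map (fun p => (p.1, pvCount text p.2)) := by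
  induction kd generalizing s with
  | nil => rfl
  | cons p t ih => simp only [PySem.List.enumerate, List.map_cons]; rw [ih]; rfl

-- the scored list has strictly increasing indices
lemma pv_scored_pairwise (text : String) (kd : List (String × List String)) (s : Int) :
    (((PySem.List.enumerate kd s).map (fun q => (pvCount text q.2.2, q.1, q.2.1))) :
      List (Nat × Int × String)).Pairwise (fun a b => a.2.1 < b.2.1) := by
  induction kd generalizing s with
  | nil => simp [PySem.List.enumerate]
  | cons p t ih =>
      simp only [PySem.List.enumerate, List.map_cons, List.pairwise_cons]
      refine ⟨?_, ih (s + 1)⟩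
      intro x hx
      rcases List.mem_map.mp hx with ⟨q, hq, rfl⟩
      have := pv_enum_ge t (s + 1) q hq
      simpa using by omega

-- sorted2 with keys (-score, index) unfolds to the insertBy fold with pvBefore
lemma pv_sorted2_eq (xs : List (Nat × Int × String)) :
    PySem.List.sorted2 xs (fun t => -(t.1 : Int)) (fun t => t.2.1) =
      xs.foldl (fun a x => PySem.List.insertBy pvBefore x a) [] := by
  rfl

-- ===== VERDICT (by name: the statement is the Claim_ definition above) =====
theorem match_keywords_py_spec : Claim_equal_match_keywords_py := by
  intro text kd _
  unfold Spec_match_keywords_py match_keywords_py_alt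
  rw [pvA_eq]
  cases hkd : (PySem.List.enumerate kd).map (fun q => (pvCount text q.2.2, q.1, q.2.1)) with
  | nil =>
      have hmapnil : kd.map (fun p => (p.1, pvCount text p.2)) = [] := by
        rw [← pv_scored_proj text kd 0, hkd]; rfl
      simp only [hmapnil, List.foldl_nil, pv_sorted2_eq]
  | cons c rest =>
      have hpw := pv_scored_pairwise text kd 0
      rw [hkd] at hpw
      rcases List.pairwise_cons.mp hpw with ⟨hc, hp'⟩
      have hhead : ((c :: rest).foldl (fun a x => PySem.List.insertBy pvBefore x a) []).head?
          = some (rest.foldl pvMax3 c) := by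
        simp only [List.foldl_cons]
        rw [pv_fold_head pvBefore rest (PySem.List.insertBy pvBefore c []) c (by rfl)]
        rw [pv_run_eq rest c hc hp']
      have hproj : (c :: rest).map pvProj = kd.map (fun p => (p.1, pvCount text p.2)) := by
        rw [← pv_scored_proj text kd 0, hkd]
      rw [← hproj]
      simp only [List.map_cons]
      rw [pv_main (rest.map pvProj) (pvProj c), ← pv_proj_fold]
      simp only [pv_sorted2_eq]
      obtain ⟨rt, hres⟩ : ∃ rt,
          (c :: rest).foldl (fun a x => PySem.List.insertBy pvBefore x a) []
            = (rest.foldl pvMax3 c) :: rt := by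
        cases hr : (c :: rest).foldl (fun a x => PySem.List.insertBy pvBefore x a) [] with
        | nil => rw [hr] at hhead; simp at hhead
        | cons r rt =>
            rw [hr] at hhead
            simp only [List.head?_cons, Option.some.injEq] at hhead
            exact ⟨rt, by rw [hhead]⟩
      rw [hres]
      rfl
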